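-- pv_equiv track=rewrite | github.com/kiukin/codewars-katas | 7_kyu/Evenly_distribute_values_in_array.py | distribute_evenly
-- ===== SOURCE A (Python) =====
-- def distribute_evenly(lst):
--
--     order = []
--     result = []
--
--     for a in lst:
--         if a not in order:
--             order.append(a)
--
--     while len(lst):
--         for n in order:
--             if n in lst:
--                 result.append(lst.pop(lst.index(n)))
--
--     return result
-- ===== SOURCE B (Python) =====
-- def distribute_evenly(lst):
--     # Count occurrences per value (dict keeps first-appearance order),
--     # then emit round-robin by decrementing counts: O(n) instead of A's O(n^2).
--     counts = {}
--     for a in lst: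
--         counts[a] = counts.get(a, 0) + 1
--     result = []
--     pending = list(counts.items())
--     while pending:
--         nxt = []
--         for k, c in pending:
--             result.append(k)
--             if c > 1:
--                 nxt.append((k, c - 1))
--         pending = nxt
--     return result
-- ===== Notes on version B (the rewrite author's own statement) =====
-- stated objective: faster
-- what changed: A repeatedly rescans and mutates the list (membership test, index, pop) once per emitted element; B counts occurrences in one dict pass and emits round-robin by decrementing counts, O(n) instead of O(n^2).
import Mathlib
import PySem

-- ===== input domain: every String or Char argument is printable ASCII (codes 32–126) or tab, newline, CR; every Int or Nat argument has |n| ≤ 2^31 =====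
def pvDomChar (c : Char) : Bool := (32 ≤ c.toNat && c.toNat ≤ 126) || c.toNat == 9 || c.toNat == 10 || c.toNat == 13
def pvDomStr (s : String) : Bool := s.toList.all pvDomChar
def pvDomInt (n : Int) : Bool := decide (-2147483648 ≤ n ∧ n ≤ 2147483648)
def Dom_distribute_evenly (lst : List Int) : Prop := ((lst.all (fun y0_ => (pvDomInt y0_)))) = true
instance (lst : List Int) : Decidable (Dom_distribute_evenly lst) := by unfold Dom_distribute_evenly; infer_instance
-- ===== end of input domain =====

-- B replaces A's repeated in/index/pop scans over the shrinking list by a single counting pass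
-- plus round-robin emission from decremented counts (objective: faster).
-- NOTE: Python A empties its argument list in place (lst.pop); B does not mutate it.
-- The equivalence proved here is about the RETURN value only.

-- ===== PORT A =====
-- for a in lst: if a not in order: order.append(a)
def pvOrderA (lst : List Int) : List Int :=
  lst.foldl (fun order a => if a ∈ order then order else order ++ [a]) []

-- one 'for n in order' pass of the while body: threads (lst, result) through
-- 'if n in lst: result.append(lst.pop(lst.index(n)))'
def pvPassA : List Int → List Int → List Int → List Int × List Int
  | [], lst, result => (lst, result)
  | n :: rest, lst, result =>
    if n ∈ lst then
      match PySem.List.index? lst n with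
      | some i =>
        match PySem.List.pop? lst (i : Int) with
        | some (x, lst') => pvPassA rest lst' (result ++ [x])
        | none => pvPassA rest lst result   -- unreachable: index? yields an in-range index
      | none => pvPassA rest lst result     -- unreachable: n ∈ lst
    else pvPassA rest lst result

-- while len(lst): <pass>.  Fuel lst.length is enough: every pass on a nonempty lst
-- removes at least one element (each element of lst occurs in order).
def pvWhileA : Nat → List Int → List Int → List Int → List Int
  | 0, _, _, result => result
  | fuel + 1, lst, order, result =>
    if lst.length ≠ 0 then
      let p := pvPassA order lst result
      pvWhileA fuel p.1 order p.2
    else result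

def distribute_evenly (lst : List Int) : List Int :=
  pvWhileA lst.length lst (pvOrderA lst) []

-- ===== PORT B =====
-- counts[a] = counts.get(a, 0) + 1
def pvCountsB (lst : List Int) : PySem.Dict Int Int :=
  lst.foldl (fun d a => d.insert a (d.getD a 0 + 1)) PySem.Dict.empty

-- one round: for (k, c) in pending: result.append(k); if c > 1: nxt.append((k, c-1))
def pvRoundB (pending : List (Int × Int)) (result : List Int) : List Int × List (Int × Int) :=
  pending.foldl
    (fun p kc => (p.1 ++ [kc.1], if kc.2 > 1 then p.2 ++ [(kc.1, kc.2 - 1)] else p.2))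
    (result, [])

-- while pending: <round>.  Fuel lst.length is enough: the number of rounds is the
-- maximum count, which is at most lst.length.
def pvWhileB : Nat → List (Int × Int) → List Int → List Int
  | 0, _, result => result
  | fuel + 1, pending, result =>
    if pending.isEmpty then result
    else
      let p := pvRoundB pending result
      pvWhileB fuel p.2 p.1

def distribute_evenly_alt (lst : List Int) : List Int :=
  pvWhileB lst.length (pvCountsB lst).items []

-- ===== PRECONDITION & SPEC =====
def Spec_distribute_evenly (lst : List Int) (out : List Int) : Prop := out = distribute_evenly_alt lst
instance (lst : List Int) (out : List Int) : Decidable (Spec_distribute_evenly lst out) := by unfold Spec_distribute_evenly; infer_instance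

-- ===== CLAIM (what is proved, stated in full; the proofs are below) =====
def Claim_equal_distribute_evenly : Prop := ∀ (lst : List Int), Dom_distribute_evenly lst → Spec_distribute_evenly lst (distribute_evenly lst)

-- ===== LEMMAS AND PROOFS =====

-- A's pass removes, for each n of order present in lst, the first occurrence of n,
-- and appends exactly the members of order still present in lst.
theorem pvPassA_spec (order : List Int) : ∀ (lst result : List Int), order.Nodup →
    pvPassA order lst result =
      (order.foldl (fun l n => l.erase n) lst,
       result ++ order.filter (fun n => decide (n ∈ lst))) := by
  induction order with
  | nil => intro lst result _; simp [pvPassA]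
  | cons n rest ih =>
    intro lst result hnd
    have hnd' := hnd.of_cons
    have hn : n ∉ rest := (List.nodup_cons.mp hnd).1
    by_cases h : n ∈ lst
    · obtain ⟨k, hk⟩ := Option.isSome_iff_exists.mp (List.isSome_idxOf?.mpr h)
      have hidx : List.idxOf n lst = k := by rw [List.idxOf_eq_getD_idxOf?, hk]; rfl
      have hi : PySem.List.index? lst n = some k := by
        rw [PySem.List.index?_eq_idxOf?]; exact hk
      subst hidx
      have hklt : List.idxOf n lst < lst.length := List.idxOf_lt_length_of_mem h
      have hget : lst[List.idxOf n lst] = n := List.getElem_idxOf hklt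
      have herase : lst.eraseIdx (List.idxOf n lst) = lst.erase n :=
        List.eraseIdx_idxOf_eq_erase n lst
      rw [pvPassA]
      simp only [if_pos h, hi, PySem.List.pop?_natCast lst _ hklt, hget, herase]
      rw [ih _ _ hnd']
      simp only [List.foldl_cons, List.filter_cons, h, decide_true]
      congr 1
      rw [List.append_assoc]
      congr 1
      rw [List.singleton_append]
      congr 1
      apply List.filter_congr
      intro m hm
      have : m ≠ n := fun e => hn (e ▸ hm)
      simp [List.mem_erase_of_ne this]
    · rw [pvPassA]
      simp only [if_neg h]
      rw [ih _ _ hnd']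
      simp only [List.foldl_cons, List.filter_cons, h, decide_false]
      rw [List.erase_of_not_mem h]
      simp

theorem pvRoundB_foldl (pending : List (Int × Int)) : ∀ (result : List Int) (acc2 : List (Int × Int)),
    pending.foldl
      (fun p kc => (p.1 ++ [kc.1], if kc.2 > 1 then p.2 ++ [(kc.1, kc.2 - 1)] else p.2))
      (result, acc2) =
      (result ++ pending.map Prod.fst,
       acc2 ++ pending.filterMap (fun kc => if kc.2 > 1 then some (kc.1, kc.2 - 1) else none)) := by
  induction pending with
  | nil => simp
  | cons kc rest ih =>
    intro result acc2
    simp only [List.foldl_cons, List.map_cons, List.filterMap_cons]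
    by_cases h : kc.2 > 1
    · simp only [if_pos h, ih]
      simp
    · simp only [if_neg h, ih]
      simp


theorem pvRoundB_spec (pending : List (Int × Int)) (result : List Int) :
    pvRoundB pending result =
      (result ++ pending.map Prod.fst,
       pending.filterMap (fun kc => if kc.2 > 1 then some (kc.1, kc.2 - 1) else none)) := by
  unfold pvRoundB
  rw [pvRoundB_foldl]
  simp

-- counts after A's pass (order Nodup: each value loses at most one occurrence)
theorem count_foldl_erase (order : List Int) : ∀ (lst : List Int) (m : Int), order.Nodup →
    (order.foldl (fun l n => l.erase n) lst).count m
      = lst.count m - (if m ∈ order then 1 else 0) := by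
  induction order with
  | nil => simp
  | cons n rest ih =>
    intro lst m hnd
    have hn : n ∉ rest := (List.nodup_cons.mp hnd).1
    simp only [List.foldl_cons]
    rw [ih _ _ hnd.of_cons]
    by_cases h : m = n
    · subst h
      simp [hn]
    · rw [List.count_erase]
      simp [List.mem_cons, h, Ne.symm h]

-- the simulation invariant: B's pending is order's values with their multiplicities in lst
def pvEncode (order lst : List Int) : List (Int × Int) :=
  order.filterMap (fun n => if 0 < lst.count n then some (n, (lst.count n : Int)) else none)

theorem pvEncode_map_fst (order lst : List Int) :
    (pvEncode order lst).map Prod.fst = order.filter (fun n => decide (n ∈ lst)) := by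
  induction order with
  | nil => rfl
  | cons n rest ih =>
    simp only [pvEncode, List.filterMap_cons] at *
    by_cases h : 0 < lst.count n
    · rw [if_pos h, List.map_cons, ih, List.filter_cons]
      simp [List.count_pos_iff.mp h]
    · have hn : n ∉ lst := fun hm => h (List.count_pos_iff.mpr hm)
      rw [if_neg h, ih, List.filter_cons]
      simp [hn]

theorem pvEncode_step (order lst : List Int) (hnd : order.Nodup) :
    (pvEncode order lst).filterMap (fun kc => if kc.2 > 1 then some (kc.1, kc.2 - 1) else none)
      = pvEncode order (order.foldl (fun l n => l.erase n) lst) := by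
  have hcnt : ∀ m, (order.foldl (fun l n => l.erase n) lst).count m
      = lst.count m - (if m ∈ order then 1 else 0) := fun m => count_foldl_erase order lst m hnd
  unfold pvEncode
  rw [List.filterMap_filterMap]
  apply List.filterMap_congr
  intro n hn
  rw [hcnt n, if_pos hn]
  rcases Nat.lt_or_ge 1 (lst.count n) with h2 | h2
  · have h0 : 0 < lst.count n := by omega
    have h0' : 0 < lst.count n - 1 := by omega
    have hc : ((lst.count n : Int)) > 1 := by exact_mod_cast h2
    simp only [if_pos h0, Option.bind_some, if_pos hc, if_pos h0']
    congr 2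
    omega
  · by_cases h0 : 0 < lst.count n
    · have h1 : lst.count n = 1 := by omega
      have hc : ¬ ((lst.count n : Int) > 1) := by simp [h1]
      simp [h1]
    · simp [h0]
      omega


theorem pvOrderA_eq (lst : List Int) : pvOrderA lst = PySem.Set.ofList lst := by
  unfold pvOrderA
  rw [PySem.Set.ofList_eq_foldl]
  apply PySem.List.foldl_congr_mem
  intro acc x _
  simp [PySem.Set.add, PySem.Set.contains]

theorem pvItems_eq (lst : List Int) : (pvCountsB lst).items = pvEncode (PySem.Set.ofList lst) lst := by
  unfold pvCountsB pvEncode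
  rw [PySem.Dict.foldl_insert_getD_add_one_eq_counter, PySem.Dict.items_counter, ← List.filterMap_eq_map]
  apply List.filterMap_congr
  intro n hn
  have : n ∈ lst := (PySem.Set.mem_ofList lst n).mp hn
  simp [List.count_pos_iff.mpr this]

theorem pvMain (fuel : Nat) : ∀ (order lst result : List Int), order.Nodup →
    (∀ x ∈ lst, x ∈ order) →
    pvWhileA fuel lst order result = pvWhileB fuel (pvEncode order lst) result := by
  induction fuel with
  | zero => intro _ _ _ _ _; rfl
  | succ fuel ih =>
    intro order lst result hnd hsub
    by_cases hl : lst = []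
    · subst hl
      simp [pvWhileA, pvWhileB, pvEncode]
    · have hlen : lst.length ≠ 0 := fun h => hl (List.eq_nil_of_length_eq_zero h)
      have hne : pvEncode order lst ≠ [] := by
        intro he
        rcases List.exists_mem_of_ne_nil lst hl with ⟨x, hx⟩
        have hxo : x ∈ order := hsub x hx
        have := (List.filterMap_eq_nil_iff.mp he) x hxo
        rw [if_pos (List.count_pos_iff.mpr hx)] at this
        simp at this
      rw [pvWhileA, pvWhileB, if_pos hlen, if_neg (by simpa [List.isEmpty_iff] using hne)]
      have hpass := pvPassA_spec order lst result hnd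
      have hround := pvRoundB_spec (pvEncode order lst) result
      rw [hpass, hround]
      rw [pvEncode_map_fst, pvEncode_step order lst hnd]
      apply ih
      · exact hnd
      · intro x hx
        have hx' : 0 < (order.foldl (fun l n => l.erase n) lst).count x :=
          List.count_pos_iff.mpr hx
        rw [count_foldl_erase order lst x hnd] at hx'
        exact hsub x (List.count_pos_iff.mp (by omega))

-- ===== VERDICT (by name: the statement is the Claim_ definition above) =====
theorem distribute_evenly_spec : Claim_equal_distribute_evenly := by
  intro lst _
  unfold Spec_distribute_evenly distribute_evenly distribute_evenly_alt
  rw [pvOrderA_eq, pvItems_eq]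
  exact pvMain lst.length _ lst [] (PySem.Set.nodup_ofList lst)
    (fun x hx => (PySem.Set.mem_ofList lst x).mpr hx)
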